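-- pv_equiv track=rewrite | github.com/pypi-data/pypi-mirror-389 | packages/rms-pds4indextools/rms_pds4indextools-1.4.0.tar.gz/rms_pds4indextools-1.4.0/pds4indextools/pds4_create_xml_index.py | simplify_xpaths
-- ===== SOURCE A (Python) =====
-- from collections import Counter
--
-- def simplify_xpaths(headers):
--     """
--     Simplifies a list of XPath headers by shortening each header to its tag and
--     namespace prefix, provided the tag is unique.
--
--     This function processes a list of XPath-like strings (headers) and attempts to
--     simplify them to their last tag component. If --simplify-xpaths is used, the XPath
--     headers will be shortened to the element's tag and namespace prefix. This is
--     contingent on the uniqueness of the XPath header; if more than one XPath header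
--     shares a tag, a namespace and a predicate value, the XPath header will remain whole.
--
--     Parameters:
--         headers (list of str): A list of strings representing XPath headers.
--
--     Returns:
--         list of str: A list of strings where unique tags have replaced their
--         corresponding full XPath headers, and non-unique tags remain unchanged.
--     """
--     #
--     tags = []
--     matches = {}
--
--     # Step 1: Gather all possible tags from labels
--     for header in headers:
--         tag = header.split('/')[-1]
--         tags.append(tag)
--         matches[header] = tag
--
--     # Step 2: Count the number of instances of each tag
--     term_counts = Counter(tags)
--
--     # Step 3: If a tag occurs only once, shorten it.
--     for ind, header in enumerate(headers):
--         tag = header.split('/')[-1]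
--         if term_counts[tag] == 1:
--             headers[ind] = tag
--
--     return headers
-- ===== SOURCE B (Python) =====
-- def simplify_xpaths(headers):
--     # Sort-then-scan: sort the positions by their tag; in sorted order equal
--     # tags are adjacent, so a tag is unique exactly when it differs from both
--     # sorted neighbours. Mutates `headers` in place, as the original does.
--     pairs = sorted(((h.split('/')[-1], i) for i, h in enumerate(headers)),
--                    key=lambda p: p[0])
--     prev = None
--     for k, (tag, i) in enumerate(pairs):
--         nxt = pairs[k + 1][0] if k + 1 < len(pairs) else None
--         if tag != prev and tag != nxt:
--             headers[i] = tag
--         prev = tag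
--     return headers
-- ===== Notes on version B (the rewrite author's own statement) =====
-- stated objective: alternative
-- what changed: Replaces A's tag-Counter plus full rewrite pass by a sort-then-scan: sort the (tag, index) pairs by tag so equal tags become adjacent, then a single scan that shortens exactly the positions whose tag differs from both sorted neighbours; no counting table at all.
import Mathlib
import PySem

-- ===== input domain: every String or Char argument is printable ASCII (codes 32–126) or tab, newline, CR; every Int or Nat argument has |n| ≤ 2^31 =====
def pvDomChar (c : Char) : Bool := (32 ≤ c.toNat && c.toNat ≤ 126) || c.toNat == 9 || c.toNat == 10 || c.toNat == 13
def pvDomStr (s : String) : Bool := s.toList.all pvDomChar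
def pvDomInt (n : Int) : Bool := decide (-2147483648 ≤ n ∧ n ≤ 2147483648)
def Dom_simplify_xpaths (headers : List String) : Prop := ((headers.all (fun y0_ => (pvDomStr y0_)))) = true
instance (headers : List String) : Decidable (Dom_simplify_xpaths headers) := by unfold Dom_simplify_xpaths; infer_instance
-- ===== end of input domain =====

-- B replaces A's tag-Counter + full rewrite pass by a sort-then-scan: sort the (tag, index)
-- pairs by tag so equal tags become adjacent, then one scan shortens exactly the positions
-- whose tag differs from both sorted neighbours. Both Pythons mutate `headers` in place;
-- the equivalence proved here is about the returned list.

-- header.split('/')[-1]; the separator "/" is nonempty so split? is always `some`,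
-- and a split result is never empty, so both defaults below are unreachable.
def pvTag (header : String) : String :=
  PySem.List.pyGetD ((PySem.Str.split? header "/").getD []) (-1) ""

-- ===== PORT A =====
def simplify_xpaths (headers : List String) : List String :=
  -- Step 1: gather tags (and the dead `matches` dict, kept faithfully)
  let st := headers.foldl
    (fun (acc : List String × PySem.Dict String String) header =>
      let tag := pvTag header
      (acc.1 ++ [tag], acc.2.insert header tag))
    (([] : List String), (PySem.Dict.empty : PySem.Dict String String))
  -- Step 2: count instances of each tag
  let term_counts := PySem.Dict.counter st.1
  -- Step 3: rewrite position ind when its tag occurs once (in-place set)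
  (PySem.List.enumerate headers).foldl
    (fun hs p =>
      let tag := pvTag p.2
      if term_counts.getD tag 0 == 1 then PySem.List.pySetD hs p.1 tag else hs)
    headers

-- ===== PORT B =====
-- the scan over the sorted (tag, index) pairs; `prev` carries the previous tag,
-- `pairs[k+1][0] if k+1 < len(pairs) else None` is the head tag of the remainder (exact)
def pvScanB : List String → Option String → List (String × Int) → List String
  | hs, _, [] => hs
  | hs, prev, (t, i) :: rest =>
      pvScanB
        (if some t ≠ prev ∧ some t ≠ rest.head?.map (fun q => q.1)
         then PySem.List.pySetD hs i t else hs)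
        (some t) rest

def simplify_xpaths_alt (headers : List String) : List String :=
  let pairs := PySem.List.sorted
    ((PySem.List.enumerate headers).map (fun p => (pvTag p.2, p.1)))
    (fun q => q.1) false
  pvScanB headers none pairs

-- ===== PRECONDITION & SPEC =====
def Spec_simplify_xpaths (headers : List String) (out : List String) : Prop := out = simplify_xpaths_alt headers
instance (headers : List String) (out : List String) : Decidable (Spec_simplify_xpaths headers out) := by unfold Spec_simplify_xpaths; infer_instance

-- ===== CLAIM (what is proved, stated in full; the proofs are below) =====
def Claim_equal_simplify_xpaths : Prop := ∀ (headers : List String), Dom_simplify_xpaths headers → Spec_simplify_xpaths headers (simplify_xpaths headers)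

-- ===== LEMMAS AND PROOFS =====

-- apply one pending update (index, value)
def pvSet (hs : List String) (q : Int × String) : List String := PySem.List.pySetD hs q.1 q.2

-- A's pending updates: every position whose tag occurs exactly once
def pvUA (headers : List String) : List (Int × String) :=
  ((PySem.List.enumerate headers).filter
      (fun p => decide ((headers.map pvTag).count (pvTag p.2) = 1))).map
    (fun p => (p.1, pvTag p.2))

-- B's pending updates, read off the scan
def pvSel : Option String → List (String × Int) → List (Int × String)
  | _, [] => []
  | prev, (t, i) :: rest =>
      (if some t ≠ prev ∧ some t ≠ rest.head?.map (fun q => q.1)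
       then [(i, t)] else []) ++ pvSel (some t) rest

-- the sorted pairs B scans
def pvSP (headers : List String) : List (String × Int) :=
  PySem.List.sorted ((PySem.List.enumerate headers).map (fun p => (pvTag p.2, p.1)))
    (fun q => q.1) false

lemma pv_fold_ifset {β : Type} (c : β → Bool) (g : β → Int) (t : β → String) :
    ∀ (l : List β) (acc : List String),
      l.foldl (fun hs p => if c p then PySem.List.pySetD hs (g p) (t p) else hs) acc
        = ((l.filter c).map (fun p => (g p, t p))).foldl pvSet acc := by
  intro l
  induction l with
  | nil => intro acc; rfl
  | cons a l ih =>
    intro acc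
    by_cases h : c a = true <;> simp [h, ih, pvSet]

lemma pv_fst_fold :
    ∀ (l : List String) (acc : List String) (d : PySem.Dict String String),
      (l.foldl (fun acc header =>
          (acc.1 ++ [pvTag header], acc.2.insert header (pvTag header))) (acc, d)).1
        = acc ++ l.map pvTag := by
  intro l
  induction l with
  | nil => simp
  | cons a l ih => intro acc d; simp [ih]

lemma pv_A_eq (headers : List String) :
    simplify_xpaths headers = (pvUA headers).foldl pvSet headers := by
  unfold simplify_xpaths
  dsimp only
  rw [pv_fst_fold headers [] PySem.Dict.empty]
  simp only [List.nil_append, PySem.Dict.getD_counter]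
  have hc : ∀ n : Nat, (((n : Nat) : Int) == 1) = decide (n = 1) := by
    intro n; by_cases h : n = 1 <;> simp [h]
  simp only [hc]
  have h2 := pv_fold_ifset (fun p : Int × String => decide ((headers.map pvTag).count (pvTag p.2) = 1))
      (fun p => p.1) (fun p => pvTag p.2) (PySem.List.enumerate headers) headers
  unfold pvUA
  convert h2 using 2

lemma pv_scan_eq :
    ∀ (l : List (String × Int)) (prev : Option String) (hs : List String),
      pvScanB hs prev l = (pvSel prev l).foldl pvSet hs := by
  intro l
  induction l with
  | nil => intro prev hs; rfl
  | cons a l ih =>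
    intro prev hs
    obtain ⟨t, i⟩ := a
    by_cases h : some t ≠ prev ∧ some t ≠ l.head?.map (fun q => q.1)
    · simp only [pvScanB, pvSel, if_pos h, ih, List.foldl_append]
      rfl
    · simp only [pvScanB, pvSel, if_neg h, ih, List.nil_append]

-- in a tag-sorted pair list, the scan's neighbour test selects exactly the unique tags
lemma pv_sel_eq :
    ∀ (l : List (String × Int)) (prev : Option String),
      (l.map (fun q => q.1)).Pairwise (· ≤ ·) →
      (∀ v, prev = some v → ∀ u ∈ l.map (fun q => q.1), v ≤ u) →
      pvSel prev l
        = (l.filter (fun p => decide ((l.map (fun q => q.1)).count p.1 = 1 ∧ some p.1 ≠ prev))).map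
            (fun p => (p.2, p.1)) := by
  intro l
  induction l with
  | nil => intro prev _ _; rfl
  | cons a l ih =>
    intro prev hsort hprev
    obtain ⟨t, i⟩ := a
    have hsort' : (l.map (fun q => q.1)).Pairwise (· ≤ ·) := (List.pairwise_cons.mp hsort).2
    have hle : ∀ u ∈ l.map (fun q => q.1), t ≤ u := by
      intro u hu
      exact (List.pairwise_cons.mp hsort).1 u hu
    -- head's neighbour test ↔ head's tag does not recur
    have hnext : (some t ≠ l.head?.map (fun q => q.1)) ↔ t ∉ l.map (fun q => q.1) := by
      cases l with
      | nil => simp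
      | cons b l' =>
        obtain ⟨u, j⟩ := b
        constructor
        · intro hne hmem
          simp only [List.map_cons, List.mem_cons] at hmem
          rcases hmem with h | h
          · exact hne (by simp [h])
          · have h1 : t ≤ u := hle u (by simp)
            have h2 : u ≤ t := by
              have := (List.pairwise_cons.mp hsort').1 t ?_
              · exact this
              · simpa using h
            exact hne (by simp [le_antisymm h1 h2])
        · intro hnm hne
          apply hnm
          simp only [List.head?_cons, Option.map_some] at hne
          have : t = u := by simpa using hne
          simp [this]
    -- rest elements: the inner predicate (count in rest, prev = some t) agrees with
    -- the outer one (count in whole list, outer prev)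
    have hfilter : l.filter (fun p => decide ((l.map (fun q => q.1)).count p.1 = 1 ∧ some p.1 ≠ some t))
        = l.filter (fun p => decide ((((t, i) :: l).map (fun q => q.1)).count p.1 = 1 ∧ some p.1 ≠ prev)) := by
      apply List.filter_congr
      intro p hp
      by_cases hpt : p.1 = t
      · have hmem : t ∈ l.map (fun q => q.1) := by
          rw [← hpt]; exact List.mem_map.mpr ⟨p, hp, rfl⟩
        have h2 : ¬ ((((t, i) :: l).map (fun q => q.1)).count p.1 = 1) := by
          simp only [List.map_cons, hpt, List.count_cons_self]
          have := List.count_pos_iff.mpr hmem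
          omega
        simp only [decide_eq_decide]
        constructor
        · intro hl; exact (hl.2 (congrArg some hpt)).elim
        · intro hr; exact (h2 hr.1).elim
      · have hcnt : (t :: l.map (fun q => q.1)).count p.1
            = (l.map (fun q => q.1)).count p.1 := List.count_cons_of_ne (Ne.symm hpt)
        have hpv : some p.1 ≠ prev := by
          intro h
          have h1 : p.1 ≤ t := hprev p.1 h.symm t (by simp)
          have h2 : t ≤ p.1 := hle p.1 (List.mem_map.mpr ⟨p, hp, rfl⟩)
          exact hpt (le_antisymm h1 h2)
        simp [hcnt, hpv, hpt]
    have hih := ih (some t) hsort' (by intro v hv; cases hv; exact hle)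
    -- head's predicate agrees with the scan's condition
    have hhead : (decide ((((t, i) :: l).map (fun q => q.1)).count t = 1 ∧ some t ≠ prev))
        = decide (some t ≠ prev ∧ some t ≠ l.head?.map (fun q => q.1)) := by
      have hcount : ((((t, i) :: l).map (fun q => q.1)).count t = 1) ↔ t ∉ l.map (fun q => q.1) := by
        simp only [List.map_cons, List.count_cons_self]
        constructor
        · intro h hmem
          have := List.count_pos_iff.mpr hmem
          omega
        · intro h
          rw [List.count_eq_zero_of_not_mem h]
      simp only [decide_eq_decide, hcount, hnext]
      tauto
    simp only [pvSel, List.filter_cons]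
    by_cases hc : some t ≠ prev ∧ some t ≠ l.head?.map (fun q => q.1)
    · have hP : (decide ((((t, i) :: l).map (fun q => q.1)).count t = 1 ∧ some t ≠ prev)) = true := by
        rw [hhead]; exact decide_eq_true hc
      rw [if_pos hc, hih, hfilter]
      simp only [List.map_cons] at hP ⊢
      rw [hP]
      simp
    · have hP : (decide ((((t, i) :: l).map (fun q => q.1)).count t = 1 ∧ some t ≠ prev)) = false := by
        rw [hhead]; exact decide_eq_false hc
      rw [if_neg hc, hih, hfilter]
      simp only [List.map_cons] at hP ⊢
      rw [hP]
      simp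

lemma pv_tags_perm (headers : List String) :
    ((pvSP headers).map (fun q => q.1)).Perm (headers.map pvTag) := by
  have h1 : (pvSP headers).Perm
      ((PySem.List.enumerate headers).map (fun p => (pvTag p.2, p.1))) :=
    PySem.List.sorted_perm _ _ _
  have h2 := h1.map (fun q : String × Int => q.1)
  rw [List.map_map] at h2
  have h3 : (List.map ((fun q : String × Int => q.1) ∘ (fun p : Int × String => (pvTag p.2, p.1)))
      (PySem.List.enumerate headers)) = headers.map pvTag := by
    rw [show ((fun q : String × Int => q.1) ∘ (fun p : Int × String => (pvTag p.2, p.1)))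
        = pvTag ∘ (fun p : Int × String => p.2) from rfl,
      ← List.map_map, PySem.List.map_snd_enumerate]
  rwa [h3] at h2

lemma pv_B_perm (headers : List String) :
    (pvUA headers).Perm (pvSel none (pvSP headers)) := by
  have hsort : ((pvSP headers).map (fun q => q.1)).Pairwise (· ≤ ·) :=
    PySem.List.sorted_map_key_pairwise _ _
  rw [pv_sel_eq (pvSP headers) none hsort (by intro v hv; cases hv)]
  have hcnt : ∀ s : String,
      ((pvSP headers).map (fun q => q.1)).count s = (headers.map pvTag).count s := by
    intro s; exact (pv_tags_perm headers).count_eq s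
  have hpred : (fun p : String × Int =>
        decide (((pvSP headers).map (fun q => q.1)).count p.1 = 1 ∧ some p.1 ≠ (none : Option String)))
      = (fun p : String × Int => decide ((headers.map pvTag).count p.1 = 1)) := by
    funext p
    simp [hcnt p.1]
  rw [hpred]
  have hperm : ((pvSP headers).filter
        (fun p => decide ((headers.map pvTag).count p.1 = 1))).Perm
      (((PySem.List.enumerate headers).map (fun p => (pvTag p.2, p.1))).filter
        (fun p => decide ((headers.map pvTag).count p.1 = 1))) :=
    (PySem.List.sorted_perm _ _ _).filter _
  have heq : (((PySem.List.enumerate headers).map (fun p => (pvTag p.2, p.1))).filter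
        (fun p => decide ((headers.map pvTag).count p.1 = 1))).map (fun p => (p.2, p.1))
      = pvUA headers := by
    rw [List.filter_map, List.map_map]
    rfl
  have := hperm.map (fun p : String × Int => (p.2, p.1))
  rw [heq] at this
  exact this.symm

lemma pv_nodup_fst_UA (headers : List String) : ((pvUA headers).map (fun q => q.1)).Nodup := by
  unfold pvUA
  rw [List.map_map]
  have h := (PySem.List.pairwise_lt_enumerate headers 0).filter
    (fun p => decide ((headers.map pvTag).count (pvTag p.2) = 1))
  exact List.pairwise_map.mpr (h.imp (fun hlt => ne_of_lt hlt))

lemma pv_UA_fst_nat (headers : List String) {x : Int × String} (hx : x ∈ pvUA headers) :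
    ∃ k : Nat, x.1 = (k : Int) := by
  unfold pvUA at hx
  obtain ⟨p, hp, rfl⟩ := List.mem_map.mp hx
  have hmem := (List.mem_filter.mp hp).1
  obtain ⟨k, hk, rfl⟩ := (PySem.List.mem_enumerate_iff _ _ _).mp hmem
  exact ⟨k, by simp⟩

-- ===== VERDICT (by name: the statement is the Claim_ definition above) =====
theorem simplify_xpaths_spec : Claim_equal_simplify_xpaths := by
  intro headers _
  unfold Spec_simplify_xpaths
  rw [pv_A_eq]
  unfold simplify_xpaths_alt
  rw [pv_scan_eq]
  refine List.Perm.foldl_eq' (pv_B_perm headers) ?_ headers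
  intro x hx y hy z
  by_cases hxy : x = y
  · simp [hxy]
  · have hne : x.1 ≠ y.1 := fun h =>
      hxy (List.inj_on_of_nodup_map (pv_nodup_fst_UA headers) hx hy h)
    obtain ⟨kx, hkx⟩ := pv_UA_fst_nat headers hx
    obtain ⟨ky, hky⟩ := pv_UA_fst_nat headers hy
    have : kx ≠ ky := by intro h; apply hne; rw [hkx, hky, h]
    simp only [pvSet, hkx, hky, PySem.List.pySetD_natCast]
    exact List.set_comm _ _ this
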